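-- pv_equiv track=rewrite | github.com/nickkamel/TriCleaver | ribogate/tc/ribozyme_templates.py | place_mismatches
-- ===== SOURCE A (Python) =====
-- def place_mismatches(num_contiguous_mismatches, spacing, segment_len):
--     '''
--     Generates a list of contiguous mismatches groups evenly spaced out along a segment
--     These mismatches give ribozyme some flexiblity when bound to transcript.
--     They also avoid extensive dsRNA that could potentially cause PKR or Dicer problems
--
--     Parameters:
--         num_contiguous_mismatches (int): the size of a contiguous group of mismatches
--         spacing (int): number of nucleotides between the mismatches. If 0, mismatches will be consecutive
--         segment_len (int): the length of the segment for which we are placing the mismatches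
--
--     Returns:
--         mismatch_idxs (list of ints): The 0-indexed locations of the mismatches on the segment
--     '''
--
--     mismatch_idxs = list()
--     group_start_idx = spacing + 1 # The +1 is just to be backwards compatible with my old approach
--     while group_start_idx < segment_len:
--         group_end_idx = min(group_start_idx + num_contiguous_mismatches, segment_len) # Truncates the last group to avoid it going out of bounds
--         for i in range(group_start_idx, group_end_idx):
--             mismatch_idxs.append(i)
--         group_start_idx += num_contiguous_mismatches + spacing
--
--     return mismatch_idxs
-- ===== SOURCE B (Python) =====
-- def place_mismatches(num_contiguous_mismatches, spacing, segment_len):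
--     # Single flat scan: a position i belongs to the mismatch part of its
--     # repeating period of length (num + spacing) starting at spacing + 1.
--     start = spacing + 1
--     period = num_contiguous_mismatches + spacing
--     return [i for i in range(start, segment_len)
--             if (i - start) % period < num_contiguous_mismatches]
-- ===== Notes on version B (the rewrite author's own statement) =====
-- stated objective: simpler
-- what changed: Replaced the nested while/for group generation with a single flat filtered scan over range(spacing+1, segment_len) using a modular predicate that identifies the mismatch part of each period.
-- outside the precondition, e.g. on place_mismatches(3, -1, 6): A returns [0, 1, 2, 2, 3, 4, 4, 5], B returns [0, 1, 2, 3, 4, 5]; on place_mismatches(0, 0, 5): A does not finish within the time limit, B raises ZeroDivisionError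
import Mathlib
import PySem

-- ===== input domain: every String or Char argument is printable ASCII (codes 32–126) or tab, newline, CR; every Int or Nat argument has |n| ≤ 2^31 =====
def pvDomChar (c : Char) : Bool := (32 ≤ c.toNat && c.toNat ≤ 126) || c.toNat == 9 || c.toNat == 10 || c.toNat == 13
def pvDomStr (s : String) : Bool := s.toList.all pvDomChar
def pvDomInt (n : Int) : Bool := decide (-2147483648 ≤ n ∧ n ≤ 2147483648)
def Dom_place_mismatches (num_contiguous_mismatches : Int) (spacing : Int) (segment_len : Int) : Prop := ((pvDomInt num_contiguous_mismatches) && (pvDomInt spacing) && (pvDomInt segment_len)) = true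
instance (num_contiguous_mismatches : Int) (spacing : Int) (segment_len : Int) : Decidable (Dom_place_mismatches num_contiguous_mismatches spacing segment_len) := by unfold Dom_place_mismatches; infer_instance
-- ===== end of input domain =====

-- B replaces A's nested group loop by one flat modular-filtered scan (same cost, simpler).


-- ===== PORT A =====
-- The while loop, fueled: under Pre_ the step is ≥ 1, so (segment_len - spacing - 1).toNat
-- iterations are always enough (the fuel guard only makes the same computation total).
def pmLoopA (num spacing seg : Int) : Nat → Int → List Int
  | 0, _ => []
  | fuel + 1, group_start_idx =>
    if group_start_idx < seg then
      PySem.List.pyRange group_start_idx (min (group_start_idx + num) seg) 1 ++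
        pmLoopA num spacing seg fuel (group_start_idx + (num + spacing))
    else []

def place_mismatches (num_contiguous_mismatches : Int) (spacing : Int) (segment_len : Int) : List Int :=
  pmLoopA num_contiguous_mismatches spacing segment_len
    (segment_len - spacing - 1).toNat (spacing + 1)

-- ===== PORT B =====
def place_mismatches_alt (num_contiguous_mismatches : Int) (spacing : Int) (segment_len : Int) : List Int :=
  (PySem.List.pyRange (spacing + 1) segment_len 1).filter
    (fun i => decide (PySem.Int.mod (i - (spacing + 1)) (num_contiguous_mismatches + spacing) < num_contiguous_mismatches))

-- ===== PRECONDITION & SPEC =====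
-- When the loop is entered (segment_len > spacing + 1), Pre_ excludes (a) inputs where A's while
-- loop never terminates (non-positive period) and (b) negative spacing, which is outside the
-- function's natural domain ("nucleotides between mismatches") and where A emits overlapping
-- duplicate indices.
def Pre_place_mismatches (num_contiguous_mismatches : Int) (spacing : Int) (segment_len : Int) : Prop :=
  segment_len ≤ spacing + 1 ∨ (0 ≤ spacing ∧ 0 < num_contiguous_mismatches + spacing)
instance (num_contiguous_mismatches : Int) (spacing : Int) (segment_len : Int) : Decidable (Pre_place_mismatches num_contiguous_mismatches spacing segment_len) := by unfold Pre_place_mismatches; infer_instance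

def pvWitness_place_mismatches : Int × Int × Int := (1, 1, 6)

def Spec_place_mismatches (num_contiguous_mismatches : Int) (spacing : Int) (segment_len : Int) (out : List Int) : Prop := out = place_mismatches_alt num_contiguous_mismatches spacing segment_len
instance (num_contiguous_mismatches : Int) (spacing : Int) (segment_len : Int) (out : List Int) : Decidable (Spec_place_mismatches num_contiguous_mismatches spacing segment_len out) := by unfold Spec_place_mismatches; infer_instance

-- ===== CLAIM (what is proved, stated in full; the proofs are below) =====
def Claim_equal_place_mismatches : Prop := ∀ (num_contiguous_mismatches : Int) (spacing : Int) (segment_len : Int), Dom_place_mismatches num_contiguous_mismatches spacing segment_len → Pre_place_mismatches num_contiguous_mismatches spacing segment_len → Spec_place_mismatches num_contiguous_mismatches spacing segment_len (place_mismatches num_contiguous_mismatches spacing segment_len)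

-- ===== LEMMAS AND PROOFS =====

-- Filtering an integer range with a predicate that is 'i < c' on that range truncates the range.
theorem pv_filter_pyRange (p : Int → Bool) (a b c : Int)
    (h : ∀ i, a ≤ i → i < b → p i = decide (i < c)) :
    (PySem.List.pyRange a b 1).filter p = PySem.List.pyRange a (min c b) 1 := by
  by_cases hab : b ≤ a
  · rw [PySem.List.pyRange_one_eq_nil hab, PySem.List.pyRange_one_eq_nil (show min c b ≤ a by omega)]
    rfl
  · have hab' : a < b := by omega
    have ih := pv_filter_pyRange p (a+1) b c (fun i h1 h2 => h i (by omega) h2)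
    rw [PySem.List.pyRange_one_cons hab', List.filter_cons, h a le_rfl hab', ih]
    by_cases hac : a < c
    · rw [PySem.List.pyRange_one_cons (show a < min c b by omega)]
      simp [hac]
    · rw [PySem.List.pyRange_one_eq_nil (show min c b ≤ a + 1 by omega),
          PySem.List.pyRange_one_eq_nil (show min c b ≤ a by omega)]
      simp [hac]
termination_by (b - a).toNat
decreasing_by omega

theorem pv_pmLoopA_dead (num spacing seg : Int) (f : Nat) (gs : Int) (h : seg ≤ gs) :
    pmLoopA num spacing seg f gs = [] := by
  cases f with
  | zero => rfl
  | succ f =>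
    simp only [pmLoopA]
    rw [if_neg (by omega)]

theorem pv_loop_eq (num spacing seg : Int) (hsp : 0 ≤ spacing) (hstep : 1 ≤ num + spacing)
    (fuel : Nat) (gs k : Int) (hk : 0 ≤ k) (hgs : gs = spacing + 1 + k * (num + spacing))
    (hfuel : (seg - gs).toNat ≤ fuel) :
    pmLoopA num spacing seg fuel gs =
      (PySem.List.pyRange gs seg 1).filter
        (fun i => decide (PySem.Int.mod (i - (spacing + 1)) (num + spacing) < num)) := by
  induction fuel generalizing gs k with
  | zero =>
    rw [pv_pmLoopA_dead num spacing seg 0 gs (by omega),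
        PySem.List.pyRange_one_eq_nil (by omega)]
    rfl
  | succ f ih =>
    by_cases hlt : gs < seg
    · have hbase : spacing + 1 ≤ gs := by nlinarith
      -- split the range at m = min (gs + (num+spacing)) seg
      have hm1 : gs ≤ min (gs + (num + spacing)) seg := by omega
      have hm2 : min (gs + (num + spacing)) seg ≤ seg := by omega
      rw [PySem.List.pyRange_one_append gs (min (gs + (num + spacing)) seg) seg hm1 hm2,
          List.filter_append]
      -- first chunk: the predicate is 'i < gs + num' on it
      have hpred : ∀ i, gs ≤ i → i < min (gs + (num + spacing)) seg →
          (decide (PySem.Int.mod (i - (spacing + 1)) (num + spacing) < num) : Bool)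
            = decide (i < gs + num) := by
        intro i h1 h2
        have hmod : PySem.Int.mod (i - (spacing + 1)) (num + spacing) = i - gs := by
          rw [PySem.Int.mod_eq_emod_of_pos (show (0:Int) < num + spacing by omega)]
          have : i - (spacing + 1) = (i - gs) + (num + spacing) * k := by
            rw [hgs]; ring
          rw [this, Int.add_mul_emod_self_left, Int.emod_eq_of_lt (by omega) (by omega)]
        rw [hmod]
        simp only [decide_eq_decide]
        omega
      rw [pv_filter_pyRange _ gs (min (gs + (num + spacing)) seg) (gs + num) hpred]
      have hend : min (gs + num) (min (gs + (num + spacing)) seg) = min (gs + num) seg := by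
        omega
      rw [hend]
      -- second chunk
      show pmLoopA num spacing seg (f + 1) gs = _
      rw [pmLoopA, if_pos hlt]
      congr 1
      by_cases hfit : gs + (num + spacing) ≤ seg
      · have : min (gs + (num + spacing)) seg = gs + (num + spacing) := by omega
        rw [this]
        exact ih (gs + (num + spacing)) (k + 1) (by omega)
          (by rw [hgs]; ring) (by omega)
      · have : min (gs + (num + spacing)) seg = seg := by omega
        rw [this, PySem.List.pyRange_one_eq_nil le_rfl,
            pv_pmLoopA_dead num spacing seg f _ (by omega)]
        rfl
    · rw [pv_pmLoopA_dead num spacing seg (f + 1) gs (by omega),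
          PySem.List.pyRange_one_eq_nil (by omega)]
      rfl

-- ===== VERDICT (by name: the statement is the Claim_ definition above) =====
theorem place_mismatches_spec : Claim_equal_place_mismatches := by
  intro num spacing seg _ hpre
  unfold Spec_place_mismatches place_mismatches place_mismatches_alt
  rcases hpre with hdeg | ⟨hsp, hstep⟩
  case inr =>
    exact pv_loop_eq num spacing seg hsp (by omega) _ (spacing + 1) 0 le_rfl
      (by ring) (by omega)
  case inl =>
    rw [(by omega : (seg - spacing - 1).toNat = 0),
        pv_pmLoopA_dead num spacing seg 0 (spacing + 1) (by omega),
        PySem.List.pyRange_one_eq_nil (by omega)]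
    rfl
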